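-- pv_equiv track=rewrite | github.com/romu42/practice | bites/bite225_convert_chars.py | convert_pybites_chars
-- ===== SOURCE A (Python) =====
-- PYBITES = "pybitesPYBITES"
--
-- def convert_pybites_chars(text):
--     """Swap case all characters in the word pybites for the given text.
--        Return the resulting string."""
--     newstring = ''
--     for char in text:
--         if char in PYBITES:
--             if char.islower():
--                 newstring += char.upper()
--             elif char.isupper():
--                 newstring += char.lower()
--         else:
--             newstring += char
--     return newstring
-- ===== SOURCE B (Python) =====
-- PYBITES = "pybitesPYBITES"
--
-- _TABLE = str.maketrans(PYBITES, PYBITES.swapcase())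
--
-- def convert_pybites_chars(text):
--     """Swap case all characters in the word pybites for the given text.
--        Return the resulting string."""
--     return text.translate(_TABLE)
-- ===== Notes on version B (the rewrite author's own statement) =====
-- stated objective: idiomatic
-- what changed: Replaces the explicit per-character scan with membership test, case branches and string concatenation by a precomputed translation table (str.maketrans) applied in one str.translate call.
import Mathlib
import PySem

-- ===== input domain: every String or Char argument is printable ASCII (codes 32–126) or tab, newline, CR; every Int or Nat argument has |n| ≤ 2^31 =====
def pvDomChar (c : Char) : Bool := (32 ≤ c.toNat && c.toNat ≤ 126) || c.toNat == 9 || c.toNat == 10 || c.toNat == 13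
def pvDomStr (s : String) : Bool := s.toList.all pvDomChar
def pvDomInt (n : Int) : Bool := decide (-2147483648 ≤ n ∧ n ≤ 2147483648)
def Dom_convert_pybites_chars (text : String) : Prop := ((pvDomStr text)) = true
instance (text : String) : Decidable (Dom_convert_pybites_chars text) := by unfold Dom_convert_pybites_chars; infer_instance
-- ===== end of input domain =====

-- B replaces A's scan-with-branches-and-accumulator by a precomputed translation table applied per character (idiomatic str.translate).

-- ===== PORT A =====
-- PYBITES = "pybitesPYBITES"
-- "pybitesPYBITES".toList written as a char-list literal
def pvPYBITES : List Char := ['p','y','b','i','t','e','s','P','Y','B','I','T','E','S']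

-- literal port of A: loop over the characters, branch, append to the accumulator
def convert_pybites_chars (text : String) : String :=
  String.ofList (text.toList.foldl
    (fun acc c =>
      if pvPYBITES.contains c then
        if PySem.Chars.islower c then acc ++ [PySem.Chars.upperChar c]
        else if PySem.Chars.isupper c then acc ++ [PySem.Chars.lowerChar c]
        else acc
      else acc ++ [c]) [])

-- ===== PORT B =====
-- str.maketrans(PYBITES, PYBITES.swapcase()): keyed here by Char instead of by ordinal
-- (ord is injective, so the char-keyed table is exact) ; translate = per-char table lookup, keep on miss
def pvTable : PySem.Dict Char Char :=
  PySem.Dict.ofList (List.zip ['p','y','b','i','t','e','s','P','Y','B','I','T','E','S']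
    ['P','Y','B','I','T','E','S','p','y','b','i','t','e','s'])  -- zip PYBITES with PYBITES.swapcase()

def convert_pybites_chars_alt (text : String) : String :=
  String.ofList (text.toList.map (fun c => (pvTable.get? c).getD c))

-- ===== PRECONDITION & SPEC =====
def Spec_convert_pybites_chars (text : String) (out : String) : Prop := out = convert_pybites_chars_alt text
instance (text : String) (out : String) : Decidable (Spec_convert_pybites_chars text out) := by unfold Spec_convert_pybites_chars; infer_instance

-- ===== CLAIM (what is proved, stated in full; the proofs are below) =====
def Claim_equal_convert_pybites_chars : Prop := ∀ (text : String), Dom_convert_pybites_chars text → Spec_convert_pybites_chars text (convert_pybites_chars text)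

-- ===== LEMMAS AND PROOFS =====

-- per-character agreement: A's contribution for one char is exactly B's translated char
theorem pv_step (acc : List Char) (c : Char) :
    (if pvPYBITES.contains c then
        if PySem.Chars.islower c then acc ++ [PySem.Chars.upperChar c]
        else if PySem.Chars.isupper c then acc ++ [PySem.Chars.lowerChar c]
        else acc
      else acc ++ [c]) = acc ++ [(pvTable.get? c).getD c] := by
  by_cases h : c ∈ pvPYBITES
  · fin_cases h <;> rfl
  · have h14 := h
    simp only [pvPYBITES, List.mem_cons, List.not_mem_nil, or_false, not_or] at h14
    obtain ⟨h1,h2,h3,h4,h5,h6,h7,h8,h9,h10,h11,h12,h13,h14⟩ := h14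
    have hT : pvTable = PySem.Dict.mk [('p','P'),('y','Y'),('b','B'),('i','I'),('t','T'),('e','E'),('s','S'),('P','p'),('Y','y'),('B','b'),('I','i'),('T','t'),('E','e'),('S','s')] := by decide
    have hget : pvTable.get? c = none := by
      rw [hT]
      simp [Ne.symm h1, Ne.symm h2, Ne.symm h3, Ne.symm h4,
        Ne.symm h5, Ne.symm h6, Ne.symm h7, Ne.symm h8, Ne.symm h9, Ne.symm h10,
        Ne.symm h11, Ne.symm h12, Ne.symm h13, Ne.symm h14, PySem.Dict.get?]
    simp [h, hget]

theorem pv_loop (l acc : List Char) :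
    l.foldl (fun acc c =>
      if pvPYBITES.contains c then
        if PySem.Chars.islower c then acc ++ [PySem.Chars.upperChar c]
        else if PySem.Chars.isupper c then acc ++ [PySem.Chars.lowerChar c]
        else acc
      else acc ++ [c]) acc = acc ++ l.map (fun c => (pvTable.get? c).getD c) := by
  induction l generalizing acc with
  | nil => simp
  | cons c cs ih => rw [List.foldl_cons, pv_step, ih]; simp

-- ===== VERDICT (by name: the statement is the Claim_ definition above) =====
theorem convert_pybites_chars_spec : Claim_equal_convert_pybites_chars := by
  intro text _
  unfold Spec_convert_pybites_chars convert_pybites_chars convert_pybites_chars_alt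
  rw [pv_loop]
  simp
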